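-- pv_equiv track=rewrite | github.com/marcelowsena/InsumoOrcamento | src/api/budget_api.py | extrair_niveis_codigo
-- ===== SOURCE A (Python) =====
-- from typing import Dict, List, Tuple, Optional
--
-- def extrair_niveis_codigo(codigo_completo: str) -> List[str]:
--     """
--     Extrai todos os níveis hierárquicos de um código
--     '05.002.001.001' → ['05', '05.002', '05.002.001', '05.002.001.001']
--     """
--     if not codigo_completo:
--         return []
--
--     partes = codigo_completo.split('.')
--     niveis = []
--
--     for i in range(1, len(partes) + 1):
--         nivel = '.'.join(partes[:i])
--         niveis.append(nivel)
--
--     return niveis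
-- ===== SOURCE B (Python) =====
-- from typing import List
--
-- def extrair_niveis_codigo(codigo_completo: str) -> List[str]:
--     """Single pass keeping a running prefix instead of re-slicing and re-joining."""
--     if not codigo_completo:
--         return []
--     partes = codigo_completo.split('.')
--     atual = partes[0]
--     niveis = [atual]
--     for parte in partes[1:]:
--         atual = atual + '.' + parte
--         niveis.append(atual)
--     return niveis
-- ===== Notes on version B (the rewrite author's own statement) =====
-- stated objective: idiomatic
-- what changed: B folds once over the parts extending a running prefix (each level built from the previous one in O(level-length)), instead of A's loop that re-slices the parts list and re-joins from scratch for every level.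
import Mathlib
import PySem

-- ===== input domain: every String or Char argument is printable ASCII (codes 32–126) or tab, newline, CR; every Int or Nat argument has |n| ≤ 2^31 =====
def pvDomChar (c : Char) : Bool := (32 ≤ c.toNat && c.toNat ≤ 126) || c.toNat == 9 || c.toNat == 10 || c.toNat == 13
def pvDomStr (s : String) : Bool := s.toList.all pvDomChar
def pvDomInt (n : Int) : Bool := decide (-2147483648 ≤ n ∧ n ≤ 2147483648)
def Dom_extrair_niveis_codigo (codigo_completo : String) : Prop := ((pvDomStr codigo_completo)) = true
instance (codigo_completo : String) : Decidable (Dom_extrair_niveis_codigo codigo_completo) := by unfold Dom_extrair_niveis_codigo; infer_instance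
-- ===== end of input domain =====

-- B replaces A's re-slice-and-re-join of every level by one fold keeping a running prefix (idiomatic single pass).


-- ===== PORT A =====
-- A: guard empty string; partes = split('.'); for i in 1..len(partes): append '.'.join(partes[:i]).
-- Joining/splitting is done on List Char (PySem.Chars is the exact model; strings rebuilt at the end).
def extrair_niveis_codigo (codigo_completo : String) : List String :=
  if codigo_completo = "" then []
  else
    let partes := PySem.Chars.splitOn codigo_completo.toList ['.']
    ((PySem.List.pyRange 1 ((partes.length : Int) + 1) 1).foldl
      (fun (niveis : List (List Char)) i =>
        niveis ++ [PySem.Chars.join ['.'] (PySem.List.slice partes none (some i))])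
      []).map String.ofList

-- ===== PORT B =====
-- B: same guard and split, then a single fold carrying the running prefix `atual`.
def extrair_niveis_codigo_alt (codigo_completo : String) : List String :=
  if codigo_completo = "" then []
  else
    match PySem.Chars.splitOn codigo_completo.toList ['.'] with
    | [] => []
    | p :: rest =>
      ((rest.foldl
          (fun (st : List Char × List (List Char)) parte =>
            let atual := st.1 ++ '.' :: parte
            (atual, st.2 ++ [atual]))
          (p, [p])).2).map String.ofList

-- ===== PRECONDITION & SPEC =====
def Spec_extrair_niveis_codigo (codigo_completo : String) (out : List String) : Prop := out = extrair_niveis_codigo_alt codigo_completo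
instance (codigo_completo : String) (out : List String) : Decidable (Spec_extrair_niveis_codigo codigo_completo out) := by unfold Spec_extrair_niveis_codigo; infer_instance

-- ===== CLAIM (what is proved, stated in full; the proofs are below) =====
def Claim_equal_extrair_niveis_codigo : Prop := ∀ (codigo_completo : String), Dom_extrair_niveis_codigo codigo_completo → Spec_extrair_niveis_codigo codigo_completo (extrair_niveis_codigo codigo_completo)

-- ===== LEMMAS AND PROOFS =====

-- generic: a foldl that only appends singletons is an append of a map
lemma foldl_push {α β : Type} (f : α → β) :
    ∀ (l : List α) (acc : List β),
      l.foldl (fun a i => a ++ [f i]) acc = acc ++ l.map f := by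
  intro l
  induction l with
  | nil => simp
  | cons x xs ih => intro acc; simp [List.foldl_cons, ih]

-- join of a cons whose head already ends in '.' ++ x
lemma join_absorb (a x : List Char) (l : List (List Char)) :
    PySem.Chars.join ['.'] ((a ++ '.' :: x) :: l) = PySem.Chars.join ['.'] (a :: x :: l) := by
  cases l with
  | nil =>
      rw [PySem.Chars.join_singleton, PySem.Chars.join_cons_cons, PySem.Chars.join_singleton]
      simp
  | cons y ys =>
      rw [PySem.Chars.join_cons_cons, PySem.Chars.join_cons_cons, PySem.Chars.join_cons_cons]
      simp [List.append_assoc]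

-- B's fold computes the same prefix joins
lemma foldB :
    ∀ (rest : List (List Char)) (a : List Char) (acc : List (List Char)),
      (rest.foldl
          (fun (st : List Char × List (List Char)) parte =>
            (st.1 ++ '.' :: parte, st.2 ++ [st.1 ++ '.' :: parte]))
          (a, acc)).2
        = acc ++ (List.range rest.length).map
            (fun k => PySem.Chars.join ['.'] ((a :: rest).take (k + 2))) := by
  intro rest
  induction rest with
  | nil => simp
  | cons x xs ih =>
      intro a acc
      simp only [List.foldl_cons]
      rw [ih (a ++ '.' :: x) (acc ++ [a ++ '.' :: x])]
      rw [List.length_cons, List.range_succ_eq_map]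
      simp only [List.map_cons, List.map_map, List.append_assoc, List.singleton_append]
      refine congrArg (acc ++ ·) ?_
      refine congrArg₂ List.cons ?_ ?_
      · show a ++ '.' :: x = PySem.Chars.join ['.'] ((a :: x :: xs).take (0 + 2))
        simp [PySem.Chars.join_cons_cons, PySem.Chars.join_singleton]
      · refine (List.map_congr_left ?_).symm
        intro k _
        simp only [Function.comp_apply, Nat.succ_eq_add_one]
        show PySem.Chars.join ['.'] ((a :: x :: xs).take (k + 1 + 2))
            = PySem.Chars.join ['.'] (((a ++ '.' :: x) :: xs).take (k + 2))
        simp only [List.take_succ_cons]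
        exact (join_absorb a x (xs.take (k + 1))).symm

-- the two list-level computations agree for any parts list
lemma core_eq (partes : List (List Char)) :
    (PySem.List.pyRange 1 ((partes.length : Int) + 1) 1).foldl
      (fun (niveis : List (List Char)) i =>
        niveis ++ [PySem.Chars.join ['.'] (PySem.List.slice partes none (some i))]) []
    = match partes with
      | [] => []
      | p :: rest =>
        (rest.foldl
          (fun (st : List Char × List (List Char)) parte =>
            (st.1 ++ '.' :: parte, st.2 ++ [st.1 ++ '.' :: parte]))
          (p, [p])).2 := by
  rw [foldl_push]
  rw [PySem.List.pyRange_one]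
  have hlen : (((partes.length : Int) + 1) - 1).toNat = partes.length := by omega
  rw [hlen]
  cases partes with
  | nil => simp
  | cons p rest =>
      dsimp only
      rw [foldB rest p [p]]
      rw [List.length_cons, List.range_succ_eq_map]
      simp only [List.map_cons, List.map_map, List.nil_append, Nat.cast_zero]
      refine congrArg₂ List.cons ?_ ?_
      · have : PySem.List.slice (p :: rest) none (some ((1 : Int) + 0))
            = (p :: rest).take 1 := by
          rw [PySem.List.slice_to _ (by omega)]; norm_num
        rw [this]; simp [PySem.Chars.join_singleton]
      · refine List.map_congr_left ?_
        intro k _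
        simp only [Function.comp_apply]
        have : PySem.List.slice (p :: rest) none (some ((1 : Int) + ((k : Int) + 1)))
            = (p :: rest).take (k + 2) := by
          rw [PySem.List.slice_to _ (by omega)]
          have h2 : ((1 : Int) + ((k : Int) + 1)).toNat = k + 2 := by omega
          rw [h2]
        push_cast
        rw [this]

-- ===== VERDICT (by name: the statement is the Claim_ definition above) =====
theorem extrair_niveis_codigo_spec : Claim_equal_extrair_niveis_codigo := by
  intro s _
  unfold Spec_extrair_niveis_codigo extrair_niveis_codigo extrair_niveis_codigo_alt
  by_cases h : s = ""
  · simp [h]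
  · simp only [h]
    rw [core_eq]
    cases PySem.Chars.splitOn s.toList ['.'] <;> rfl
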